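-- pv_equiv track=rewrite | github.com/pypi-data/pypi-mirror-358 | packages/clyp/clyp-0.1.0-py3-none-any.whl/clyp/transpiler.py | _process_pipeline_chain
-- ===== SOURCE A (Python) =====
-- def _process_pipeline_chain(chain: str) -> str:
--     parts = [p.strip() for p in chain.split('|>') if p.strip()]
--     if len(parts) < 2:
--         return chain
--
--     result = parts[0]
--     for part in parts[1:]:
--         if not part:
--             continue
--         if '(' in part and part.endswith(')'):
--             open_paren_index = part.find('(')
--             func_name = part[:open_paren_index].strip()
--             args = part[open_paren_index+1:-1].strip()
--             if args:
--                 result = f"{func_name}({result}, {args})"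
--             else:
--                 result = f"{func_name}({result})"
--         else:
--             func_name = part.strip()
--             result = f"{func_name}({result})"
--     return result
-- ===== SOURCE B (Python) =====
-- def _process_pipeline_chain(chain: str) -> str:
--     parts = [q for q in (p.strip() for p in chain.split('|>')) if q]
--     if len(parts) < 2:
--         return chain
--
--     def build(k: int) -> str:
--         if k == 0:
--             return parts[0]
--         inner = build(k - 1)
--         part = parts[k]
--         name, sep, rest = part.partition('(')
--         if sep and part.endswith(')'):
--             args = rest[:-1].strip()
--             if args:
--                 return f"{name.strip()}({inner}, {args})"
--             return f"{name.strip()}({inner})"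
--         return f"{part}({inner})"
--
--     return build(len(parts) - 1)
-- ===== Notes on version B (the rewrite author's own statement) =====
-- stated objective: alternative
-- what changed: B keeps only nonempty stripped parts via a generator/filter, parses each stage with str.partition at the first opening parenthesis (a takeWhile/dropWhile span) instead of find plus index slicing, and builds the result by recursion from the last stage inward instead of A's left-to-right accumulator loop.
import Mathlib
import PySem

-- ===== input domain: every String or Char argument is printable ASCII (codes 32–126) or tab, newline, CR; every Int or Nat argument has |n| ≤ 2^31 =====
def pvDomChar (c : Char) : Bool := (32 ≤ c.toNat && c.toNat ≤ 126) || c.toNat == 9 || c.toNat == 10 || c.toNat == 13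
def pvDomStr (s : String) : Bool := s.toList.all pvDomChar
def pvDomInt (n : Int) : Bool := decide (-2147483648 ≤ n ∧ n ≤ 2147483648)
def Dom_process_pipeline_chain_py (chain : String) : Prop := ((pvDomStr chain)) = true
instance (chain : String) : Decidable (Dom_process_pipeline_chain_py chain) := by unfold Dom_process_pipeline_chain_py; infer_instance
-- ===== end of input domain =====

-- B parses each stage with a partition-at-'(' (takeWhile/dropWhile span) instead of find+slices,
-- keeps nonempty stripped parts by a filterMap, and builds the result by recursion from the
-- last stage inward instead of A's left-to-right accumulator loop.


-- ===== PORT A =====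
-- parts = [p.strip() for p in chain.split('|>') if p.strip()]
def pvPartsA (chain : String) : List (List Char) :=
  ((PySem.Chars.splitOn chain.toList ['|', '>']).map PySem.Chars.strip).filter (fun p => !p.isEmpty)

-- the body of A's loop: one iteration updating `result`
def pvStepA (result part : List Char) : List Char :=
  if part.isEmpty then result
  else if PySem.Chars.isIn ['('] part && PySem.Chars.endswith part [')'] then
    let i := PySem.Chars.find part ['(']
    let func_name := PySem.Chars.strip (PySem.List.slice part none (some i))
    let args := PySem.Chars.strip (PySem.List.slice part (some (i + 1)) (some (-1)))
    if !args.isEmpty then func_name ++ ['('] ++ result ++ [',', ' '] ++ args ++ [')']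
    else func_name ++ ['('] ++ result ++ [')']
  else PySem.Chars.strip part ++ ['('] ++ result ++ [')']

def process_pipeline_chain_py (chain : String) : String :=
  let parts := pvPartsA chain
  if parts.length < 2 then chain
  else
    match parts with
    | [] => chain  -- unreachable: length ≥ 2
    | p0 :: rest => String.ofList (rest.foldl pvStepA p0)

-- ===== PORT B =====
-- name, sep, rest = part.partition('('); wrap `inner` in this stage's call
def pvWrapB (inner part : List Char) : List Char :=
  let name := part.takeWhile (fun c => c ≠ '(')
  let found := part.dropWhile (fun c => c ≠ '(')
  if !found.isEmpty && PySem.Chars.endswith part [')'] then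
    let args := PySem.Chars.strip found.tail.dropLast
    if !args.isEmpty then
      PySem.Chars.strip name ++ ['('] ++ inner ++ [',', ' '] ++ args ++ [')']
    else PySem.Chars.strip name ++ ['('] ++ inner ++ [')']
  else part ++ ['('] ++ inner ++ [')']

-- build(k): recursion from the last stage inward (the list is parts[1:] reversed)
def pvBuildB (p0 : List Char) : List (List Char) → List Char
  | [] => p0
  | part :: earlier => pvWrapB (pvBuildB p0 earlier) part

def process_pipeline_chain_py_alt (chain : String) : String :=
  let parts := (PySem.Chars.splitOn chain.toList ['|', '>']).filterMap (fun p =>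
    let q := PySem.Chars.strip p
    if q.isEmpty then none else some q)
  if parts.length < 2 then chain
  else
    match parts with
    | [] => chain  -- unreachable: length ≥ 2
    | p0 :: rest => String.ofList (pvBuildB p0 rest.reverse)

-- ===== PRECONDITION & SPEC =====
def Spec_process_pipeline_chain_py (chain : String) (out : String) : Prop := out = process_pipeline_chain_py_alt chain
instance (chain : String) (out : String) : Decidable (Spec_process_pipeline_chain_py chain out) := by unfold Spec_process_pipeline_chain_py; infer_instance

-- ===== CLAIM (what is proved, stated in full; the proofs are below) =====
def Claim_equal_process_pipeline_chain_py : Prop := ∀ (chain : String), Dom_process_pipeline_chain_py chain → Spec_process_pipeline_chain_py chain (process_pipeline_chain_py chain)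

-- ===== LEMMAS AND PROOFS =====

-- B's filterMap computes A's map-then-filter parts list
theorem filterMap_eq_parts (l : List (List Char)) :
    l.filterMap (fun p => let q := PySem.Chars.strip p; if q.isEmpty then none else some q)
      = (l.map PySem.Chars.strip).filter (fun p => !p.isEmpty) := by
  induction l with
  | nil => rfl
  | cons x l ih =>
    simp only [List.filterMap_cons, List.map_cons, List.filter_cons, ih]
    by_cases h : (PySem.Chars.strip x).isEmpty <;> simp [h]

-- a prefix of a dropWhile-fixed list is dropWhile-fixed
theorem dropWhile_eq_self_of_prefix {α : Type} (p : α → Bool) (t u : List α)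
    (ht : t.dropWhile p = t) (hu : u <+: t) : u.dropWhile p = u := by
  cases u with
  | nil => simp
  | cons a u' =>
    obtain ⟨s, hs⟩ := hu
    have ha : p a = false := by
      by_contra h
      have ha' : p a = true := by simpa using h
      rw [← hs] at ht
      simp only [List.cons_append] at ht
      rw [List.dropWhile_cons, if_pos ha'] at ht
      have := congrArg List.length ht
      have hle := List.length_dropWhile_le p (u' ++ s)
      simp at this hle
      omega
    rw [List.dropWhile_cons, if_neg (by simp [ha])]

theorem strip_strip (s : List Char) :
    PySem.Chars.strip (PySem.Chars.strip s) = PySem.Chars.strip s := by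
  unfold PySem.Chars.strip PySem.Chars.lstrip PySem.Chars.rstrip
  set p := PySem.Chars.isspace
  set t := s.dropWhile p with ht
  have hfix : t.dropWhile p = t := List.dropWhile_idempotent p s
  have hpre : (t.reverse.dropWhile p).reverse <+: t := by
    have := List.dropWhile_suffix (l := t.reverse) p
    have := List.reverse_prefix.mpr this
    simpa using this
  have h1 : ((t.reverse.dropWhile p).reverse).dropWhile p = (t.reverse.dropWhile p).reverse :=
    dropWhile_eq_self_of_prefix p t _ hfix hpre
  rw [h1]
  simp [List.dropWhile_idempotent]

-- every element of A's parts list is nonempty and strip-fixed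
theorem pvParts_mem (chain : String) (q : List Char) (hq : q ∈ pvPartsA chain) :
    q.isEmpty = false ∧ PySem.Chars.strip q = q := by
  unfold pvPartsA at hq
  simp only [List.mem_filter, List.mem_map] at hq
  obtain ⟨⟨r, _, hr⟩, hne⟩ := hq
  refine ⟨by simpa using hne, ?_⟩
  rw [← hr]; exact strip_strip r

-- span at the first occurrence: takeWhile/dropWhile are take i / drop i
theorem span_at_first (l : List Char) (i : Nat) (hi : i < l.length) (h1 : l[i] = '(')
    (h2 : ∀ j, (hj : j < i) → l[j]'(by omega) ≠ '(') :
    l.takeWhile (fun c => c ≠ '(') = l.take i ∧ l.dropWhile (fun c => c ≠ '(') = l.drop i := by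
  induction l generalizing i with
  | nil => simp at hi
  | cons a l ih =>
    cases i with
    | zero =>
      simp at h1
      subst h1
      constructor
      · rw [List.takeWhile_cons, if_neg (by simp)]
        rfl
      · rw [List.dropWhile_cons, if_neg (by simp)]
        simp
    | succ i =>
      have ha : a ≠ '(' := h2 0 (by omega)
      have := ih i (by simpa using hi) (by simpa using h1)
        (fun j hj => by
          have := h2 (j + 1) (by omega)
          simpa using this)
      constructor
      · rw [List.takeWhile_cons, if_pos (by simp [ha]), this.1, List.take_succ_cons]
      · rw [List.dropWhile_cons, if_pos (by simp [ha]), this.2, List.drop_succ_cons]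

-- part[a:-1] = dropLast of drop a  (natural start, -1 end)
theorem slice_natCast_neg_one (xs : List Char) (a : Nat) :
    PySem.List.slice xs (some (a : Int)) (some (-1)) = (xs.drop a).dropLast := by
  have hnn : ¬ ((a : Int) < 0) := by omega
  simp only [PySem.List.slice, PySem.List.clampIdx, if_neg hnn]
  rw [List.dropLast_eq_take, List.length_drop]
  have e1 : (if (xs.length : Int) + -1 < 0 then 0 else ((xs.length : Int) + -1).toNat)
      = xs.length - 1 := by split <;> omega
  rw [e1, if_pos (show (-1:Int) < 0 by omega)]
  simp only [Int.toNat_natCast]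
  rcases Nat.le_total a xs.length with ha | ha
  · have e2 : min a xs.length = a := by omega
    rw [e2]
    congr 1
    omega
  · have e2 : min a xs.length = xs.length := by omega
    have d2 : xs.drop a = [] := List.drop_eq_nil_of_le (by omega)
    rw [e2, List.drop_length, d2]
    simp

-- one wrap of B equals one loop iteration of A (on a nonempty strip-fixed part)
theorem wrapB_eq_stepA (inner part : List Char) (h1 : part.isEmpty = false)
    (h2 : PySem.Chars.strip part = part) :
    pvWrapB inner part = pvStepA inner part := by
  unfold pvWrapB pvStepA
  simp only [h1, Bool.false_eq_true, if_false]
  by_cases hin : PySem.Chars.isIn ['('] part = true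
  · -- '(' occurs in part; let i be its first index
    have hinf : ['('] <:+: part := (PySem.Chars.isIn_iff_infix _ _).mp hin
    have hnn : 0 ≤ PySem.Chars.find part ['('] := (PySem.Chars.find_nonneg_iff _ _).mpr hinf
    set iZ := PySem.Chars.find part ['('] with hiZ
    set i := iZ.toNat with hi
    have hiZi : iZ = (i : Int) := by omega
    obtain ⟨hpre, hmin⟩ := PySem.Chars.find_spec (s := part) (sub := ['(']) hnn
    rw [← hiZ, ← hi] at hpre hmin
    have hilt : i < part.length := by
      rcases hpre with ⟨s, hs⟩
      have := congrArg List.length hs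
      simp [List.length_drop] at this
      omega
    have hgeti : part[i] = '(' := by
      rcases hpre with ⟨s, hs⟩
      rw [List.drop_eq_getElem_cons hilt] at hs
      simp only [List.cons_append, List.nil_append] at hs
      exact (List.cons_eq_cons.mp hs).1.symm
    have hbefore : ∀ j, (hj : j < i) → part[j]'(by omega) ≠ '(' := by
      intro j hj hcontra
      apply hmin j hj
      have hd := List.drop_eq_getElem_cons (l := part) (show j < part.length by omega)
      rw [hd, hcontra]
      exact ⟨part.drop (j + 1), rfl⟩
    obtain ⟨htw, hdw⟩ := span_at_first part i hilt hgeti hbefore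
    have hfe : (part.drop i).isEmpty = false := by
      cases hdp : part.drop i with
      | nil =>
        have := congrArg List.length hdp
        simp at this
        omega
      | cons c cs => rfl
    rw [hin, htw, hdw, hfe]
    simp only [Bool.not_false, Bool.true_and]
    by_cases hend : PySem.Chars.endswith part [')'] = true
    · rw [hend]
      simp only [if_true]
      have hname : PySem.List.slice part none (some iZ) = part.take i := by
        rw [hiZi, PySem.List.slice_to_natCast]
      have hargs : PySem.List.slice part (some (iZ + 1)) (some (-1))
          = (part.drop i).tail.dropLast := by
        have h9 : iZ + 1 = ((i + 1 : Nat) : Int) := by omega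
        rw [h9, slice_natCast_neg_one, List.tail_drop]
      rw [hname, hargs]
    · simp [hend, h2]
  · -- no '(' in part: dropWhile drops the whole list
    have hnotmem : '(' ∉ part := by
      intro hmem
      apply hin
      rw [PySem.Chars.isIn_iff_infix]
      obtain ⟨l1, l2, hl⟩ := List.append_of_mem hmem
      exact ⟨l1, l2, by simp [hl]⟩
    have hdw : part.dropWhile (fun c => c ≠ '(') = [] := by
      rw [List.dropWhile_eq_nil_iff]
      intro x hx
      simp
      rintro rfl
      exact hnotmem hx
    have hinF : PySem.Chars.isIn ['('] part = false := by simpa using hin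
    rw [hdw, hinF]
    simp [h2]

-- B's inward recursion over the reversed list equals A's left fold
theorem buildB_eq_foldl (p0 : List Char) (m : List (List Char))
    (h : ∀ q ∈ m, q.isEmpty = false ∧ PySem.Chars.strip q = q) :
    pvBuildB p0 m = m.reverse.foldl pvStepA p0 := by
  induction m with
  | nil => rfl
  | cons x m ih =>
    obtain ⟨hx1, hx2⟩ := h x (by simp)
    simp only [pvBuildB, List.reverse_cons, List.foldl_append, List.foldl_cons, List.foldl_nil]
    rw [ih (fun q hq => h q (by simp [hq])), wrapB_eq_stepA _ x hx1 hx2]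

-- ===== VERDICT (by name: the statement is the Claim_ definition above) =====
theorem process_pipeline_chain_py_spec : Claim_equal_process_pipeline_chain_py := by
  intro chain _
  unfold Spec_process_pipeline_chain_py process_pipeline_chain_py process_pipeline_chain_py_alt
  rw [filterMap_eq_parts]
  have hP : ((PySem.Chars.splitOn chain.toList ['|', '>']).map PySem.Chars.strip).filter
      (fun p => !p.isEmpty) = pvPartsA chain := rfl
  rw [hP]
  cases hp : pvPartsA chain with
  | nil => simp
  | cons p0 rest =>
    have hm : ∀ q ∈ rest.reverse, q.isEmpty = false ∧ PySem.Chars.strip q = q := by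
      intro q hq
      exact pvParts_mem chain q (by rw [hp]; exact List.mem_cons_of_mem _ (by simpa using hq))
    dsimp only
    split_ifs
    · rfl
    · rw [buildB_eq_foldl p0 rest.reverse hm, List.reverse_reverse]
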